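-- pv_equiv track=rewrite | github.com/theguyoverthere/CMU15-112-Spring17 | src/Week3/Practice/sameChars.py | compareLookupStrings
-- ===== SOURCE A (Python) =====
-- def compareLookupStrings(n1, n2):
--
--     if (n1 == 0 and n2 != 0) or (n1 != 0 and n2 == 0):
--         return False
--
--     while n1 > 0 and n2 > 0:
--         nthDigit1 = n1 % 10
--         nthDigit2 = n2 % 10
--
--         if (nthDigit1 * nthDigit2 == 0) and (nthDigit1 + nthDigit2 > 0):
--             return False
--
--         n1 //= 10
--         n2 //= 10
--
--     return True
-- ===== SOURCE B (Python) =====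
-- def compareLookupStrings(n1, n2):
--     if (n1 == 0) != (n2 == 0):
--         return False
--     if n1 <= 0 or n2 <= 0:
--         return True
--     for c1, c2 in zip(reversed(str(n1)), reversed(str(n2))):
--         if (c1 == '0') != (c2 == '0'):
--             return False
--     return True
-- ===== Notes on version B (the rewrite author's own statement) =====
-- stated objective: idiomatic
-- what changed: Replaces the arithmetic digit-peeling while loop (%, //=) with a zip over the reversed decimal string representations, comparing aligned characters against '0'.
import Mathlib
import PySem

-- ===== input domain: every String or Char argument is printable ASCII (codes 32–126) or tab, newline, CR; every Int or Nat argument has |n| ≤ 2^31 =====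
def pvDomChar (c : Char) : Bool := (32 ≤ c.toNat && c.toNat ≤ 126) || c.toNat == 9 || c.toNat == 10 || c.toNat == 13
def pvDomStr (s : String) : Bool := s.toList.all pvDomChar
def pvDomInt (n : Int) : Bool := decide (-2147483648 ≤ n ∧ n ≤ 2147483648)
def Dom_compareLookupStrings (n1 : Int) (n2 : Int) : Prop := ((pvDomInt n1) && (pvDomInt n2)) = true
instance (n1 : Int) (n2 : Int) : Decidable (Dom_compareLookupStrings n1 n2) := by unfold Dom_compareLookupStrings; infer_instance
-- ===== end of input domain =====

-- B replaces A's arithmetic digit-peeling while loop with a zip over the reversed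
-- decimal string representations (idiomatic; same cost).


-- ===== PORT A =====
-- the while loop of A: peel one digit off each number while both are positive
def pvLoopA (n1 : Int) (n2 : Int) : Bool :=
  if _h : n1 > 0 ∧ n2 > 0 then
    let nthDigit1 := PySem.Int.mod n1 10
    let nthDigit2 := PySem.Int.mod n2 10
    if nthDigit1 * nthDigit2 = 0 ∧ nthDigit1 + nthDigit2 > 0 then false
    else pvLoopA (PySem.Int.floordiv n1 10) (PySem.Int.floordiv n2 10)
  else true
termination_by n1.toNat
decreasing_by
  rw [PySem.Int.floordiv_eq_ediv_of_pos (by norm_num : (0:Int) < 10)]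
  omega

def compareLookupStrings (n1 : Int) (n2 : Int) : Bool :=
  if (n1 = 0 ∧ n2 ≠ 0) ∨ (n1 ≠ 0 ∧ n2 = 0) then false
  else pvLoopA n1 n2

-- ===== PORT B =====
-- the zip loop of B: walk the two reversed character lists in step
def pvZipCheck : List Char → List Char → Bool
  | c1 :: t1, c2 :: t2 =>
      if (c1 == '0') != (c2 == '0') then false else pvZipCheck t1 t2
  | _, _ => true

def compareLookupStrings_alt (n1 : Int) (n2 : Int) : Bool :=
  if (decide (n1 = 0)) != (decide (n2 = 0)) then false
  else if n1 ≤ 0 ∨ n2 ≤ 0 then true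
  else pvZipCheck (PySem.Int.toStr n1).toList.reverse (PySem.Int.toStr n2).toList.reverse

-- ===== PRECONDITION & SPEC =====
def Spec_compareLookupStrings (n1 : Int) (n2 : Int) (out : Bool) : Prop := out = compareLookupStrings_alt n1 n2
instance (n1 : Int) (n2 : Int) (out : Bool) : Decidable (Spec_compareLookupStrings n1 n2 out) := by unfold Spec_compareLookupStrings; infer_instance

-- ===== CLAIM (what is proved, stated in full; the proofs are below) =====
def Claim_equal_compareLookupStrings : Prop := ∀ (n1 : Int) (n2 : Int), Dom_compareLookupStrings n1 n2 → Spec_compareLookupStrings n1 n2 (compareLookupStrings n1 n2)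

-- ===== LEMMAS AND PROOFS =====

-- little-endian digit characters of a natural number (empty for 0)
def pvDigitsRev (m : Nat) : List Char :=
  if h : m = 0 then []
  else (m % 10).digitChar :: pvDigitsRev (m / 10)
termination_by m
decreasing_by omega

lemma pvDigitsRev_pos (m : Nat) (h : m ≠ 0) :
    pvDigitsRev m = (m % 10).digitChar :: pvDigitsRev (m / 10) := by
  conv_lhs => rw [pvDigitsRev]
  rw [dif_neg h]

lemma pvDigitsRev_zero : pvDigitsRev 0 = [] := by rw [pvDigitsRev]; simp

lemma pvToDigitsCore_eq (fuel n : Nat) (ds : List Char) (h : n < fuel) :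
    Nat.toDigitsCore 10 fuel n ds =
      (if n = 0 then ['0'] else (pvDigitsRev n).reverse) ++ ds := by
  induction fuel generalizing n ds with
  | zero => omega
  | succ fuel ih =>
    rw [Nat.toDigitsCore]
    by_cases h0 : n / 10 = 0
    · simp only [h0]
      by_cases hn : n = 0
      · subst hn; simp; decide
      · rw [if_neg hn, pvDigitsRev_pos n hn, h0, pvDigitsRev_zero]
        simp
    · rw [if_neg h0, ih _ _ (by omega), if_neg h0]
      have hn : n ≠ 0 := by omega
      rw [if_neg hn]
      conv_rhs => rw [pvDigitsRev_pos n hn]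
      simp

lemma pvToStr_reverse (n : Int) (hn : 0 < n) :
    (PySem.Int.toStr n).toList.reverse = pvDigitsRev n.toNat := by
  rw [PySem.Int.toList_toStr]
  unfold PySem.Int.toChars
  rw [if_neg (by omega)]
  unfold Nat.toDigits
  rw [pvToDigitsCore_eq _ _ _ (by omega), if_neg (by omega)]
  simp

lemma pvDigitChar_eq_zero (d : Nat) (h : d < 10) :
    (d.digitChar == '0') = decide (d = 0) := by
  interval_cases d <;> decide

lemma pvZipCheck_nil_left (l : List Char) : pvZipCheck [] l = true := by cases l <;> rfl
lemma pvZipCheck_nil_right (l : List Char) : pvZipCheck l [] = true := by cases l <;> rfl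
lemma pvLoopA_exit (n1 n2 : Int) (h : ¬ (n1 > 0 ∧ n2 > 0)) : pvLoopA n1 n2 = true := by
  rw [pvLoopA, dif_neg h]

lemma pvLoop_eq_zip (a b : Nat) (ha : 0 < a) (hb : 0 < b) :
    pvLoopA (a : Int) (b : Int) = pvZipCheck (pvDigitsRev a) (pvDigitsRev b) := by
  induction a using Nat.strong_induction_on generalizing b with
  | _ a ih =>
    rw [pvLoopA, dif_pos (⟨by exact_mod_cast ha, by exact_mod_cast hb⟩ : (a:Int) > 0 ∧ (b:Int) > 0)]
    dsimp only
    rw [pvDigitsRev_pos a (by omega), pvDigitsRev_pos b (by omega), pvZipCheck]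
    have hma : PySem.Int.mod (a : Int) 10 = ((a % 10 : Nat) : Int) := by
      exact_mod_cast PySem.Int.mod_natCast a 10
    have hmb : PySem.Int.mod (b : Int) 10 = ((b % 10 : Nat) : Int) := by
      exact_mod_cast PySem.Int.mod_natCast b 10
    have hfa : PySem.Int.floordiv (a : Int) 10 = ((a / 10 : Nat) : Int) := by
      exact_mod_cast PySem.Int.floordiv_natCast a 10
    have hfb : PySem.Int.floordiv (b : Int) 10 = ((b / 10 : Nat) : Int) := by
      exact_mod_cast PySem.Int.floordiv_natCast b 10
    rw [hma, hmb, hfa, hfb]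
    rw [pvDigitChar_eq_zero _ (Nat.mod_lt _ (by norm_num)),
        pvDigitChar_eq_zero _ (Nat.mod_lt _ (by norm_num))]
    by_cases hx : a % 10 = 0 <;> by_cases hy : b % 10 = 0
    · rw [if_neg (by simp [hx, hy]), if_neg (by simp [hx, hy])]
      by_cases hda : a / 10 = 0
      · rw [hda, pvDigitsRev_zero, pvZipCheck_nil_left, pvLoopA_exit _ _ (by simp)]
      · by_cases hdb : b / 10 = 0
        · rw [hdb, pvDigitsRev_zero, pvZipCheck_nil_right, pvLoopA_exit _ _ (by simp)]
        · exact ih (a / 10) (by omega) (b / 10) (by omega) (by omega)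
    · rw [if_pos ⟨by simp [hx], by omega⟩, if_pos (by simp [hx, hy])]
    · rw [if_pos ⟨by simp [hy], by omega⟩, if_pos (by simp [hx, hy])]
    · rw [if_neg ?_, if_neg (by simp [hx, hy])]
      · by_cases hda : a / 10 = 0
        · rw [hda, pvDigitsRev_zero, pvZipCheck_nil_left, pvLoopA_exit _ _ (by simp)]
        · by_cases hdb : b / 10 = 0
          · rw [hdb, pvDigitsRev_zero, pvZipCheck_nil_right, pvLoopA_exit _ _ (by simp)]
          · exact ih (a / 10) (by omega) (b / 10) (by omega) (by omega)
      · rintro ⟨h1, -⟩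
        rcases mul_eq_zero.mp h1 with h | h
        · exact hx (by exact_mod_cast h)
        · exact hy (by exact_mod_cast h)

-- ===== VERDICT (by name: the statement is the Claim_ definition above) =====
theorem compareLookupStrings_spec : Claim_equal_compareLookupStrings := by
  intro n1 n2 _
  unfold Spec_compareLookupStrings compareLookupStrings compareLookupStrings_alt
  by_cases hg : (n1 = 0 ∧ n2 ≠ 0) ∨ (n1 ≠ 0 ∧ n2 = 0)
  · rw [if_pos hg]
    have hxor : (decide (n1 = 0) != decide (n2 = 0)) = true := by
      rcases hg with ⟨h1, h2⟩ | ⟨h1, h2⟩ <;> simp [h1, h2]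
    rw [hxor]; rfl
  · rw [if_neg hg]
    have hxor : (decide (n1 = 0) != decide (n2 = 0)) = false := by
      by_cases h1 : n1 = 0 <;> by_cases h2 : n2 = 0 <;> simp_all
    rw [hxor]
    simp only [Bool.false_eq_true, if_false]
    by_cases hle : n1 ≤ 0 ∨ n2 ≤ 0
    · rw [if_pos hle, pvLoopA_exit _ _ (by omega)]
    · rw [if_neg hle]
      have h1 : 0 < n1 := by omega
      have h2 : 0 < n2 := by omega
      rw [pvToStr_reverse n1 h1, pvToStr_reverse n2 h2]
      have e1 : n1 = ((n1.toNat : Nat) : Int) := by omega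
      have e2 : n2 = ((n2.toNat : Nat) : Int) := by omega
      rw [e1, e2]
      exact pvLoop_eq_zip n1.toNat n2.toNat (by omega) (by omega)
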